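-- pv_equiv track=rewrite | github.com/AlibabaPAI/reconfigurable-dl-scheduler | simulator/synergy.py | _get_underutilized_servers
-- ===== SOURCE A (Python) =====
-- import heapq
--
-- def _get_underutilized_servers(job_gpu_deficit, free_rsc):
--     nodes_map = {}
--     if job_gpu_deficit > 1:
--         for node_idx in free_rsc["gpu"]:
--             if free_rsc["gpu"][node_idx] >= job_gpu_deficit:
--                 return {node_idx: job_gpu_deficit}
--     pq = [(num, node_idx) for node_idx, num in free_rsc["gpu"].items()]
--     heapq.heapify(pq)
--     while job_gpu_deficit > 0 and len(pq) > 0: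
--         gpus, serv = heapq.heappop(pq)
--         if gpus >= job_gpu_deficit:
--             nodes_map[serv] = job_gpu_deficit
--             return nodes_map
--         else:
--             nodes_map[serv] = gpus
--             job_gpu_deficit -= gpus
--     return nodes_map
-- ===== SOURCE B (Python) =====
-- def _get_underutilized_servers(job_gpu_deficit, free_rsc):
--     gpu = free_rsc["gpu"]
--     if job_gpu_deficit > 1:
--         for node_idx, num in gpu.items():
--             if num >= job_gpu_deficit:
--                 return {node_idx: job_gpu_deficit}
--     if job_gpu_deficit <= 0:
--         return {}
--     pairs = sorted((num, node_idx) for node_idx, num in gpu.items())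
--     # prefix[j] = total GPUs of the j smallest entries
--     prefix = []
--     t = 0
--     for num, _ in pairs:
--         prefix.append(t)
--         t += num
--     # cut point: first entry that alone covers what the entries before it leave over
--     hit = next(((j, serv, p) for j, ((num, serv), p) in enumerate(zip(pairs, prefix))
--                 if num >= job_gpu_deficit - p), None)
--     if hit is None:
--         return {serv: num for num, serv in pairs}
--     j, serv, p = hit
--     result = {s: n for n, s in pairs[:j]}
--     result[serv] = job_gpu_deficit - p
--     return result
-- ===== Notes on version B (the rewrite author's own statement) =====
-- stated objective: alternative
-- what changed: Replaces A's heap-pop consume loop with running deficit by a staged computation: sort the (gpus, node) pairs once, compute prefix sums, locate the cut point (first entry covering the residual deficit) arithmetically, and assemble the result dict from the slice before the cut plus the residual at the cut.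
import Mathlib
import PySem

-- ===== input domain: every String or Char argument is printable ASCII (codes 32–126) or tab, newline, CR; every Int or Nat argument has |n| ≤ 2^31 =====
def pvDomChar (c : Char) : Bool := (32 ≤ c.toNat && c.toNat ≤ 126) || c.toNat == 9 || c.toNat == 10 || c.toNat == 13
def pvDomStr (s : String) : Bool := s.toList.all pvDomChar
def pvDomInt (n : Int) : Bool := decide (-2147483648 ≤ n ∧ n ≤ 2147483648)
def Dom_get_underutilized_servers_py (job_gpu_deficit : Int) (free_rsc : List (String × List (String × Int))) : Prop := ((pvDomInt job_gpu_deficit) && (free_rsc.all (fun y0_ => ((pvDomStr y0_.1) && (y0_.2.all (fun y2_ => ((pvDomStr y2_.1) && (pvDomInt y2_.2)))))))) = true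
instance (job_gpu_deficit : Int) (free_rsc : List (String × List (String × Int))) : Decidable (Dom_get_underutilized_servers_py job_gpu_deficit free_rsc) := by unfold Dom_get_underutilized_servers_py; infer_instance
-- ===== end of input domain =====

-- B replaces A's heap-pop consume loop (mutable running deficit) by staged passes: sort once,
-- prefix sums, an arithmetic cut point, and the result assembled from the slice before the cut.

-- Python's tuple order on the heap/sort entries (num, node_idx): lexicographic, strings compared
-- by code points (String.toList keeps Lean's order kernel-reducible and equal to Python's).
def pvHeapKey (p : Int × String) : Lex (Int × List Char) := toLex (p.1, p.2.toList)

-- ===== PORT A =====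
-- phase 1: 'for node_idx in free_rsc["gpu"]: if free_rsc["gpu"][node_idx] >= job_gpu_deficit: return …'
-- (iterates the dict's keys and looks each one up again; the key is always present, so getD's default is never read)
def pyFindBig (gpu : PySem.Dict String Int) (d : Int) : List String → Option String
  | [] => none
  | k :: ks => if gpu.getD k 0 ≥ d then some k else pyFindBig gpu d ks

-- 'heapq.heapify(pq)' + the 'while' of 'heappop's, ported by heapq's library contract: each heappop
-- removes and returns the least remaining (num, node_idx) pair under Python's tuple order — exact
-- here because min? takes the first minimum and erase removes the first occurrence, and equal pairs
-- are indistinguishable as values.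
def pyPopLoop (pq : List (Int × String)) (d : Int) (acc : PySem.Dict String Int) : PySem.Dict String Int :=
  if 0 < d then
    match h : PySem.List.min? pq pvHeapKey with
    | none => acc
    | some m =>
      if m.1 ≥ d then acc.insert m.2 d
      else pyPopLoop (pq.erase m) (d - m.1) (acc.insert m.2 m.1)
  else acc
termination_by pq.length
decreasing_by
  have hm := PySem.List.min?_mem h
  have h1 := List.length_pos_of_mem hm
  have h2 := List.length_erase_of_mem hm
  omega

def get_underutilized_servers_py (job_gpu_deficit : Int) (free_rsc : List (String × List (String × Int))) : List (String × Int) :=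
  match (PySem.Dict.ofList free_rsc).get? "gpu" with
  | none => []          -- free_rsc["gpu"] raises KeyError in Python: excluded by Pre_
  | some g =>
    let gpu := PySem.Dict.ofList g
    match (if job_gpu_deficit > 1 then pyFindBig gpu job_gpu_deficit gpu.keys else none) with
    | some k => [(k, job_gpu_deficit)]      -- 'return {node_idx: job_gpu_deficit}'
    | none =>
      let pq := gpu.items.map (fun kv => (kv.2, kv.1))
      (pyPopLoop pq job_gpu_deficit PySem.Dict.empty).items

-- ===== PORT B =====
-- phase 1 of B: 'for node_idx, num in gpu.items(): if num >= job_gpu_deficit: return …'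
def altFindBig (d : Int) : List (String × Int) → Option String
  | [] => none
  | kv :: rest => if kv.2 ≥ d then some kv.1 else altFindBig d rest

-- 'prefix = []; t = 0; for num, _ in pairs: prefix.append(t); t += num'
def altPrefix (t : Int) : List (Int × String) → List Int
  | [] => []
  | m :: rest => t :: altPrefix (t + m.1) rest

-- 'next(((j, serv, p) for j, ((num, serv), p) in enumerate(zip(pairs, prefix)) if num >= d - p), None)'
def altFindCut (d : Int) (j : Nat) : List ((Int × String) × Int) → Option (Nat × String × Int)
  | [] => none
  | e :: rest => if e.1.1 ≥ d - e.2 then some (j, e.1.2, e.2) else altFindCut d (j + 1) rest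

def get_underutilized_servers_py_alt (job_gpu_deficit : Int) (free_rsc : List (String × List (String × Int))) : List (String × Int) :=
  match (PySem.Dict.ofList free_rsc).get? "gpu" with
  | none => []          -- free_rsc["gpu"] raises KeyError in Python: excluded by Pre_
  | some g =>
    let gpu := PySem.Dict.ofList g
    match (if job_gpu_deficit > 1 then altFindBig job_gpu_deficit gpu.items else none) with
    | some k => [(k, job_gpu_deficit)]
    | none =>
      if job_gpu_deficit ≤ 0 then []       -- 'return {}'
      else
        let pairs := PySem.List.sorted (gpu.items.map (fun kv => (kv.2, kv.1))) pvHeapKey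
        match altFindCut job_gpu_deficit 0 (pairs.zip (altPrefix 0 pairs)) with
        | none => (PySem.Dict.ofList (pairs.map (fun ns => (ns.2, ns.1)))).items
        | some (j, serv, p) =>
          -- 'pairs[:j]' with j ≥ 0 and j ≤ len(pairs) is exactly List.take j
          ((PySem.Dict.ofList ((pairs.take j).map (fun ns => (ns.2, ns.1)))).insert serv (job_gpu_deficit - p)).items

-- ===== PRECONDITION & SPEC =====
-- Pre_ excludes exactly the inputs without a "gpu" key, on which Python's free_rsc["gpu"] raises KeyError.
def Pre_get_underutilized_servers_py (job_gpu_deficit : Int) (free_rsc : List (String × List (String × Int))) : Prop :=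
  ∃ p ∈ free_rsc, p.1 = "gpu"
instance (job_gpu_deficit : Int) (free_rsc : List (String × List (String × Int))) : Decidable (Pre_get_underutilized_servers_py job_gpu_deficit free_rsc) := by unfold Pre_get_underutilized_servers_py; infer_instance

def pvWitness_get_underutilized_servers_py : Int × (List (String × List (String × Int))) :=
  (2, [("gpu", [("n0", 1), ("n1", 3)])])

def Spec_get_underutilized_servers_py (job_gpu_deficit : Int) (free_rsc : List (String × List (String × Int))) (out : List (String × Int)) : Prop := out = get_underutilized_servers_py_alt job_gpu_deficit free_rsc
instance (job_gpu_deficit : Int) (free_rsc : List (String × List (String × Int))) (out : List (String × Int)) : Decidable (Spec_get_underutilized_servers_py job_gpu_deficit free_rsc out) := by unfold Spec_get_underutilized_servers_py; infer_instance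

-- ===== CLAIM (what is proved, stated in full; the proofs are below) =====
def Claim_equal_get_underutilized_servers_py : Prop := ∀ (job_gpu_deficit : Int) (free_rsc : List (String × List (String × Int))), Dom_get_underutilized_servers_py job_gpu_deficit free_rsc → Pre_get_underutilized_servers_py job_gpu_deficit free_rsc → Spec_get_underutilized_servers_py job_gpu_deficit free_rsc (get_underutilized_servers_py job_gpu_deficit free_rsc)

-- ===== LEMMAS AND PROOFS =====

-- proof-only intermediate: the stateful smallest-first consumption written over an already sorted list
def altScan : List (Int × String) → Int → PySem.Dict String Int → PySem.Dict String Int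
  | [], _, acc => acc
  | m :: rest, d, acc =>
    if d ≤ 0 then acc
    else if m.1 ≥ d then acc.insert m.2 d
    else altScan rest (d - m.1) (acc.insert m.2 m.1)

theorem pvHeapKey_inj : Function.Injective pvHeapKey := by
  intro p q h
  unfold pvHeapKey at h
  have h' : (p.1, p.2.toList) = (q.1, q.2.toList) := toLex.injective h
  obtain ⟨h1, h2⟩ := Prod.mk.inj h'
  exact Prod.ext h1 (String.toList_inj.mp h2)

-- updating a dict cannot erase a key: if the result lacks k, so did the start
theorem get?_none_of_update_none {κ ν : Type} [BEq κ] [LawfulBEq κ] [DecidableEq κ] {k : κ}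
    (t : List (κ × ν)) (d : PySem.Dict κ ν) (h : (d.update t).get? k = none) :
    d.get? k = none := by
  induction t generalizing d with
  | nil => exact h
  | cons a s ih =>
    have h' : ((d.insert a.1 a.2).update s).get? k = none := h
    have hi := ih _ h'
    rw [PySem.Dict.get?_insert] at hi
    by_cases hk : k = a.1
    · simp [hk] at hi
    · simpa [hk] using hi

-- if ofList finds no key k, no pair of the list carries k
theorem not_key_of_update_none {κ ν : Type} [BEq κ] [LawfulBEq κ] [DecidableEq κ] {k : κ}
    (l : List (κ × ν)) (d : PySem.Dict κ ν) (h : (d.update l).get? k = none) :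
    ∀ p ∈ l, p.1 ≠ k := by
  induction l generalizing d with
  | nil => intro p hp; cases hp
  | cons q t ih =>
    intro p hp
    have h' : ((d.insert q.1 q.2).update t).get? k = none := h
    rcases List.mem_cons.mp hp with hp | hp
    · subst hp
      have hi := get?_none_of_update_none t _ h'
      rw [PySem.Dict.get?_insert] at hi
      intro hc
      simp [hc.symm] at hi
    · exact ih _ h' p hp

-- phase 1 of A (keys + re-lookup) equals phase 1 of B (items)
theorem findBig_eq (gpu : PySem.Dict String Int) (d : Int) (l : List (String × Int))
    (hl : ∀ p ∈ l, gpu.getD p.1 0 = p.2) :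
    pyFindBig gpu d (l.map Prod.fst) = altFindBig d l := by
  induction l with
  | nil => rfl
  | cons p t ih =>
    have hp := hl p (by simp)
    simp only [List.map_cons, pyFindBig, altFindBig, hp]
    by_cases hge : p.2 ≥ d
    · simp [hge]
    · simp [hge]
      exact ih (fun q hq => hl q (by simp [hq]))

-- the (num, node_idx) pairs built from a dict with nodup keys have nodup sort keys
theorem swap_key_nodup (l : List (String × Int)) (h : (l.map Prod.fst).Nodup) :
    ((l.map (fun kv => (kv.2, kv.1))).map pvHeapKey).Nodup := by
  rw [List.map_map]
  induction l with
  | nil => simp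
  | cons p t ih =>
    simp only [List.map_cons, List.nodup_cons] at h ⊢
    refine ⟨?_, ih h.2⟩
    intro hc
    rcases List.mem_map.mp hc with ⟨q, hq, he⟩
    have : (q.2, q.1) = (p.2, p.1) := pvHeapKey_inj he
    have : q.1 = p.1 := congrArg Prod.snd this
    exact h.1 (this ▸ List.mem_map_of_mem hq)

-- the sorted list starts with the minimum, followed by the sorted remainder
theorem sorted_min_cons {pq : List (Int × String)} {m : Int × String}
    (hnd : (pq.map pvHeapKey).Nodup) (hm : PySem.List.min? pq pvHeapKey = some m) :
    PySem.List.sorted pq pvHeapKey = m :: PySem.List.sorted (pq.erase m) pvHeapKey := by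
  have hmem := PySem.List.min?_mem hm
  have hnil : pq ≠ [] := List.ne_nil_of_mem hmem
  cases hs : PySem.List.sorted pq pvHeapKey with
  | nil => exact absurd ((PySem.List.sorted_eq_nil_iff pq pvHeapKey false).mp hs) hnil
  | cons h0 t =>
    have hperm : (h0 :: t).Perm pq := by
      have := PySem.List.sorted_perm pq pvHeapKey false
      rwa [hs] at this
    have h0mem : h0 ∈ pq := hperm.mem_iff.mp (by simp)
    have hle1 := PySem.List.key_head_sorted_le pq pvHeapKey hs
    have hle2 := PySem.List.min?_isMin hm
    have h0m : h0 = m :=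
      pvHeapKey_inj (le_antisymm (hle1 m hmem) (hle2 h0 h0mem))
    have ht : t.Perm (pq.erase m) := ((h0m ▸ hperm).trans (List.perm_cons_erase hmem)).cons_inv
    have hple : (List.map pvHeapKey (h0 :: t)).Pairwise (· ≤ ·) := by
      have := PySem.List.sorted_map_key_pairwise pq pvHeapKey
      rwa [hs] at this
    have hndt : (List.map pvHeapKey (h0 :: t)).Nodup :=
      (hperm.map pvHeapKey).nodup_iff.mpr hnd
    have hplt : (List.map pvHeapKey t).Pairwise (· < ·) := by
      have := (hple.and hndt).imp (fun h => lt_of_le_of_ne h.1 h.2)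
      exact (List.pairwise_cons.mp this).2
    have hplt' : t.Pairwise (fun a b => pvHeapKey a < pvHeapKey b) :=
      (List.pairwise_map.mp hplt)
    rw [h0m, PySem.List.sorted_eq_of_perm_of_pairwise_lt (pq.erase m) t pvHeapKey ht hplt']

-- the extract-min loop of A consumes exactly the sorted list
theorem pop_eq_scan (n : Nat) : ∀ (pq : List (Int × String)), pq.length = n →
    ((pq.map pvHeapKey).Nodup) → ∀ (d : Int) (acc : PySem.Dict String Int),
    pyPopLoop pq d acc = altScan (PySem.List.sorted pq pvHeapKey) d acc := by
  induction n using Nat.strong_induction_on with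
  | _ n ih =>
    intro pq hlen hnd d acc
    rw [pyPopLoop]
    by_cases hd : 0 < d
    · simp only [hd, if_pos]
      cases hm : PySem.List.min? pq pvHeapKey with
      | none =>
        have : pq = [] := (PySem.List.min?_eq_none_iff pq pvHeapKey).mp hm
        subst this
        rfl
      | some m =>
        rw [sorted_min_cons hnd hm]
        have hmem := PySem.List.min?_mem hm
        by_cases hg : m.1 ≥ d
        · simp [altScan, hg, not_le.mpr hd]
        · simp only [hg, altScan, not_le.mpr hd, if_false]
          have hlt : (pq.erase m).length < n := by
            have h2 := List.length_erase_of_mem hmem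
            have h1 := List.length_pos_of_mem hmem
            omega
          have hnd' : ((pq.erase m).map pvHeapKey).Nodup :=
            hnd.sublist (List.erase_sublist.map pvHeapKey)
          exact ih _ hlt _ rfl hnd' _ _
    · have hd' : d ≤ 0 := by omega
      simp only [hd, if_false]
      cases PySem.List.sorted pq pvHeapKey with
      | nil => rfl
      | cons a t => simp [altScan, hd']

-- the index returned by altFindCut merely counts skipped entries
theorem findCut_shift (d : Int) (j : Nat) (l : List ((Int × String) × Int)) :
    altFindCut d (j + 1) l = (altFindCut d j l).map (fun r => (r.1 + 1, r.2)) := by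
  induction l generalizing j with
  | nil => rfl
  | cons e rest ih =>
    simp only [altFindCut]
    by_cases hc : e.1.1 ≥ d - e.2
    · simp [hc]
    · simp only [hc, if_false]
      exact ih (j + 1)

-- the stateful scan equals B's cut-point construction (t = GPUs already consumed)
theorem scan_eq_cut (s : List (Int × String)) : ∀ (D t : Int) (acc : PySem.Dict String Int),
    0 < D - t →
    altScan s (D - t) acc =
      (match altFindCut D 0 (s.zip (altPrefix t s)) with
       | none => acc.update (s.map (fun ns => (ns.2, ns.1)))
       | some (j, serv, p) =>
         (acc.update ((s.take j).map (fun ns => (ns.2, ns.1)))).insert serv (D - p)) := by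
  induction s with
  | nil => intro D t acc _; rfl
  | cons m rest ih =>
    intro D t acc hpos
    simp only [altPrefix, List.zip_cons_cons, altFindCut, altScan, not_le.mpr hpos, if_false]
    by_cases hg : m.1 ≥ D - t
    · simp [hg, PySem.Dict.update]
    · simp only [hg, if_false]
      rw [findCut_shift]
      have hpos' : 0 < D - (t + m.1) := by
        have := not_le.mp hg; omega
      have hrec := ih D (t + m.1) (acc.insert m.2 m.1) hpos'
      have hd : D - t - m.1 = D - (t + m.1) := by omega
      rw [hd, hrec]
      cases altFindCut D 0 (rest.zip (altPrefix (t + m.1) rest)) with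
      | none => rfl
      | some r => rfl

-- every dict item re-looked-up by its key gives back its value (keys of an ofList dict are nodup)
theorem getD_items (g : List (String × Int)) (p : String × Int)
    (hp : p ∈ (PySem.Dict.ofList g).items) :
    (PySem.Dict.ofList g).getD p.1 0 = p.2 :=
  PySem.Dict.getD_of_mem_items _ hp (PySem.Dict.nodup_keys_ofList g) 0

-- ===== VERDICT (by name: the statement is the Claim_ definition above) =====
theorem get_underutilized_servers_py_spec : Claim_equal_get_underutilized_servers_py := by
  intro job_gpu_deficit free_rsc _ hpre
  unfold Spec_get_underutilized_servers_py
  unfold get_underutilized_servers_py get_underutilized_servers_py_alt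
  cases hg : (PySem.Dict.ofList free_rsc).get? "gpu" with
  | none =>
    rcases hpre with ⟨p, hp, hk⟩
    exact absurd hk (not_key_of_update_none free_rsc PySem.Dict.empty hg p hp)
  | some g =>
    have hfind : pyFindBig (PySem.Dict.ofList g) job_gpu_deficit (PySem.Dict.ofList g).keys
        = altFindBig job_gpu_deficit (PySem.Dict.ofList g).items := by
      have : (PySem.Dict.ofList g).keys = (PySem.Dict.ofList g).items.map Prod.fst := by
        simp [PySem.Dict.keys]
      rw [this]
      exact findBig_eq _ _ _ (fun p hp => getD_items g p hp)
    simp only [hfind]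
    cases hph : (if job_gpu_deficit > 1 then altFindBig job_gpu_deficit (PySem.Dict.ofList g).items else none) with
    | some k => rfl
    | none =>
      have hnd : (((PySem.Dict.ofList g).items.map (fun kv => (kv.2, kv.1))).map pvHeapKey).Nodup :=
        swap_key_nodup _ (PySem.Dict.nodup_keys_ofList g)
      rw [pop_eq_scan _ _ rfl hnd]
      by_cases hd : job_gpu_deficit ≤ 0
      · rw [if_pos hd]
        cases PySem.List.sorted ((PySem.Dict.ofList g).items.map (fun kv => (kv.2, kv.1))) pvHeapKey with
        | nil => rfl
        | cons a t => simp [altScan, hd, PySem.Dict.empty]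
      · rw [if_neg hd]
        have hpos : 0 < job_gpu_deficit - 0 := by omega
        have := scan_eq_cut
          (PySem.List.sorted ((PySem.Dict.ofList g).items.map (fun kv => (kv.2, kv.1))) pvHeapKey)
          job_gpu_deficit 0 PySem.Dict.empty hpos
        simp only [sub_zero] at this
        rw [this]
        cases altFindCut job_gpu_deficit 0 _ with
        | none => rfl
        | some r => rfl
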